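-- pv_equiv track=rewrite | github.com/hebertjosedev/test_python_hack_2 | hack_1.py | fn_hack_1
-- ===== SOURCE A (Python) =====
-- def fn_hack_1(palabra):
--     if len(palabra) < 3:return palabra
--     palabra = list(palabra)
--     rango_inicial= 1
--     pivote = rango_inicial
--     for k in range(len(palabra)):
--         if rango_inicial == 0:
--             palabra[k] = palabra[k].upper()
--             rango_inicial = pivote + 1
--             pivote = rango_inicial
--         else:
--             rango_inicial -=1
--
--     return ("".join(palabra))
-- ===== SOURCE B (Python) =====
-- def fn_hack_1(palabra):
--     if len(palabra) < 3:
--         return palabra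
--     chars = list(palabra)
--     idx, gap = 1, 3
--     while idx < len(chars):
--         chars[idx] = chars[idx].upper()
--         idx += gap
--         gap += 1
--     return "".join(chars)
-- ===== Notes on version B (the rewrite author's own statement) =====
-- stated objective: simpler
-- what changed: Replaced A's scan over every index with a decrementing counter/pivot pair by a while loop that jumps directly to the uppercase positions (idx starts at 1, step gap=3 and grows by 1 each hit), so the loop runs O(sqrt(n)) iterations instead of n.
import Mathlib
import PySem

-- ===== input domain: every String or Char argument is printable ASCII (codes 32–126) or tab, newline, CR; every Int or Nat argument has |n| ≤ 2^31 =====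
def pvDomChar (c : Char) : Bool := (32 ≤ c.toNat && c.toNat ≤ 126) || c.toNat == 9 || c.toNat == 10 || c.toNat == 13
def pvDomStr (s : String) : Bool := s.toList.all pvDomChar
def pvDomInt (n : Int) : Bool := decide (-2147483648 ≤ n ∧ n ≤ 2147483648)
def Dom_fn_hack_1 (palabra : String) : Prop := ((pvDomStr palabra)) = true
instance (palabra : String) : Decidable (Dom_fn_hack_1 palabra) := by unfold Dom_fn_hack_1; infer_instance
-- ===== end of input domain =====

-- B replaces A's per-index countdown scan by direct jumps to the uppercase positions (idx=1, gap=3,4,5,…); simpler loop, same O(n) result.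

-- ===== PORT A =====
-- A's for-loop over k with state (rango_inicial, pivote); palabra[k] is only read/written
-- at the current index, so the scan is the structural recursion below.
def pvALoop : List Char → Nat → Nat → List Char
  | [], _, _ => []
  | c :: rest, r, p =>
    if r = 0 then c.toUpper :: pvALoop rest (p + 1) (p + 1)
    else c :: pvALoop rest (r - 1) p

def fn_hack_1 (palabra : String) : String :=
  if palabra.toList.length < 3 then palabra
  else String.mk (pvALoop palabra.toList 1 1)

-- ===== PORT B =====
-- B's while-loop: uppercase chars[idx], idx += gap, gap += 1.  The hypothesis 0 < gap
-- only justifies termination (gap is 3,4,5,… in every actual call).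
def pvBGo (chars : List Char) (idx gap : Nat) (hg : 0 < gap) : List Char :=
  if h : idx < chars.length then
    pvBGo (chars.set idx (chars[idx].toUpper)) (idx + gap) (gap + 1) (by omega)
  else chars
termination_by chars.length - idx
decreasing_by simp only [List.length_set]; omega

def fn_hack_1_alt (palabra : String) : String :=
  if palabra.toList.length < 3 then palabra
  else String.mk (pvBGo palabra.toList 1 3 (by omega))

-- ===== PRECONDITION & SPEC =====
def Spec_fn_hack_1 (palabra : String) (out : String) : Prop := out = fn_hack_1_alt palabra
instance (palabra : String) (out : String) : Decidable (Spec_fn_hack_1 palabra out) := by unfold Spec_fn_hack_1; infer_instance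

-- ===== CLAIM (what is proved, stated in full; the proofs are below) =====
def Claim_equal_fn_hack_1 : Prop := ∀ (palabra : String), Dom_fn_hack_1 palabra → Spec_fn_hack_1 palabra (fn_hack_1 palabra)

-- ===== LEMMAS AND PROOFS =====

-- shift lemma: skipping a head character decrements the absolute index
theorem pvBGo_cons (n : ℕ) : ∀ (cs : List Char) (c : Char) (j g : ℕ) (hg : 0 < g),
    cs.length - j ≤ n → pvBGo (c :: cs) (j + 1) g hg = c :: pvBGo cs j g hg := by
  induction n with
  | zero =>
    intro cs c j g hg hn
    have hj : ¬ j < cs.length := by omega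
    rw [pvBGo, pvBGo]
    simp [hj]
  | succ n ih =>
    intro cs c j g hg hn
    by_cases hj : j < cs.length
    · rw [pvBGo, pvBGo]
      have h1 : j + 1 < (c :: cs).length := by simp; omega
      simp only [hj, h1, dif_pos]
      have hset : (c :: cs).set (j + 1) ((c :: cs)[j + 1].toUpper)
          = c :: cs.set j (cs[j].toUpper) := by
        simp [List.getElem_cons_succ]
      rw [hset]
      have : (cs.set j (cs[j]'hj).toUpper).length - (j + g) ≤ n := by
        simp only [List.length_set]; omega
      have := ih (cs.set j (cs[j]'hj).toUpper) c (j + g) (g + 1) (by omega) this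
      rw [show j + 1 + g = j + g + 1 by omega, this]
    · rw [pvBGo, pvBGo]
      have h1 : ¬ j + 1 < (c :: cs).length := by simp; omega
      simp [hj]

-- main bridge: A's countdown with counter r and pivote p equals B's jump loop
-- starting at absolute index r with gap p+2
theorem pvLoop_eq : ∀ (cs : List Char) (r p : ℕ),
    pvALoop cs r p = pvBGo cs r (p + 2) (by omega) := by
  intro cs
  induction cs with
  | nil =>
    intro r p
    rw [pvALoop.eq_def, pvBGo]
    simp
  | cons c cs ih =>
    intro r p
    cases r with
    | zero =>
      rw [pvALoop, pvBGo]
      have h0 : 0 < (c :: cs).length := by simp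
      simp only [h0, dif_pos, if_true]
      have hset : (c :: cs).set 0 ((c :: cs)[0].toUpper) = c.toUpper :: cs := by simp
      rw [hset, show (0 : ℕ) + (p + 2) = (p + 1) + 1 by omega,
          pvBGo_cons cs.length cs c.toUpper (p + 1) (p + 3) (by omega) (by omega)]
      rw [ih (p + 1) (p + 1)]
    | succ r' =>
      rw [pvALoop]
      simp only [Nat.succ_ne_zero, Nat.add_sub_cancel, if_false]
      rw [pvBGo_cons cs.length cs c r' (p + 2) (by omega) (by omega)]
      rw [ih r' p]

-- ===== VERDICT (by name: the statement is the Claim_ definition above) =====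
theorem fn_hack_1_spec : Claim_equal_fn_hack_1 := by
  intro palabra _
  unfold Spec_fn_hack_1 fn_hack_1 fn_hack_1_alt
  by_cases h : palabra.toList.length < 3
  · rw [if_pos h, if_pos h]
  · rw [if_neg h, if_neg h]
    exact congrArg String.mk (pvLoop_eq palabra.toList 1 1)
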